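-- pv_equiv track=rewrite | github.com/YudiZhu/ga-pso-CNN | utils.py | differenceConvPool
-- ===== SOURCE A (Python) =====
-- from itertools import zip_longest
--
-- def differenceConvPool(p1,p2):
--     ##卷积池化层差异计算方法
--     diff = []
--
--     for comb in zip_longest(p1,p2): #按长度较长的打包，短的会填充None,实际上是在一层一层地做比较
--         if comb[0] != None and comb[1] != None: ##在两个网络有对应层的情况下
--             if comb[0]["type"] == comb[1]["type"]:
--                 diff.append({"type": "keep"})  ##如果两个网络层类型相同，则保留
--             else:
--                 diff.append(comb[0])  ##不同，则添加左边网络的结构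
--
--         elif comb[0] != None and comb[1] == None:  #如果两边的层级结构对不上了，且是右边的网络结束了，则添加左边的网络层级
--             diff.append(comb[0])
--
--         elif comb[0] == None and comb[1] != None:  ##如果是左边网络结束了而右边网络还有，就添加remove操作
--             diff.append({"type": "remove"})
--
--     return diff
-- ===== SOURCE B (Python) =====
-- def differenceConvPool(p1, p2):
--     # structural recursion on the two layer lists (no loop, no None sentinels):
--     # peel one layer off each list at a time and cons the decision onto the
--     # recursive result; a base case handles whichever list runs out first.
--     if not p1 and not p2:
--         return []
--     if not p2:
--         return list(p1)
--     if not p1: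
--         return [{"type": "remove"}] + differenceConvPool(p1, p2[1:])
--     head = {"type": "keep"} if p1[0]["type"] == p2[0]["type"] else p1[0]
--     return [head] + differenceConvPool(p1[1:], p2[1:])
-- ===== Notes on version B (the rewrite author's own statement) =====
-- stated objective: alternative
-- what changed: Replaces the iterative zip_longest loop with four-way None dispatch by a direct structural recursion on the two lists that conses each decision onto the recursive result, with base cases for whichever list runs out.
import Mathlib
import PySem

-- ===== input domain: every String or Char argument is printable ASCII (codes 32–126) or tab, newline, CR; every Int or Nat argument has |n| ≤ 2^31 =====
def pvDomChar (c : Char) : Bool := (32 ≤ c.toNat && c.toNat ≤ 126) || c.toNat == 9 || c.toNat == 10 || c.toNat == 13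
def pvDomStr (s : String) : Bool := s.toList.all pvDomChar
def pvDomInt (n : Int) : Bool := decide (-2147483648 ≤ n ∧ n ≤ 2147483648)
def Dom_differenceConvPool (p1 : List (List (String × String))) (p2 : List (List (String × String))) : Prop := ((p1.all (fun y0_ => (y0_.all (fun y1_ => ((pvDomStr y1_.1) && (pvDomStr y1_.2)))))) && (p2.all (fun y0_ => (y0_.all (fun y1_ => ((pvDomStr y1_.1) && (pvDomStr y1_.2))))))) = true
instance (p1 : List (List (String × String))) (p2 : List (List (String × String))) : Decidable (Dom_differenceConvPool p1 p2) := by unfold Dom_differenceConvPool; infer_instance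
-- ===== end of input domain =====

-- B replaces A's iterative zip_longest accumulator loop by a structural recursion on the two lists (alternative decomposition, same result).

-- shared helper: d["type"] as a first-match dict lookup (none = KeyError, excluded by Pre_)
def pvTypeOf (d : List (String × String)) : Option String := (PySem.Dict.mk d).get? "type"

-- ===== PORT A =====
-- itertools.zip_longest(p1, p2) with fill value None, as Option
def pvZipLongest : List (List (String × String)) → List (List (String × String)) →
    List (Option (List (String × String)) × Option (List (String × String)))
  | [], [] => []
  | a :: as, [] => (some a, none) :: pvZipLongest as []
  | [], b :: bs => (none, some b) :: pvZipLongest [] bs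
  | a :: as, b :: bs => (some a, some b) :: pvZipLongest as bs

def differenceConvPool (p1 : List (List (String × String))) (p2 : List (List (String × String))) : List (List (String × String)) :=
  (pvZipLongest p1 p2).foldl (fun diff comb =>
    match comb with
    | (some a, some b) =>
        if pvTypeOf a = pvTypeOf b then diff ++ [[("type", "keep")]] else diff ++ [a]
    | (some a, none) => diff ++ [a]
    | (none, some _) => diff ++ [[("type", "remove")]]
    | (none, none) => diff) []

-- ===== PORT B =====
-- structural recursion, following Source B's branch order: both empty, p2 empty, p1 empty, both nonempty
def differenceConvPool_alt (p1 : List (List (String × String))) (p2 : List (List (String × String))) : List (List (String × String)) :=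
  match p1, p2 with
  | [], [] => []
  | a :: as, [] => a :: as
  | [], _ :: bs => [("type", "remove")] :: differenceConvPool_alt [] bs
  | a :: as, b :: bs =>
      (if pvTypeOf a = pvTypeOf b then [("type", "keep")] else a) :: differenceConvPool_alt as bs

-- ===== PRECONDITION & SPEC =====
-- Pre_ excludes exactly the inputs where Python A raises KeyError: a layer in the
-- common prefix of p1 and p2 missing the "type" key.
def Pre_differenceConvPool (p1 : List (List (String × String))) (p2 : List (List (String × String))) : Prop :=
  ∀ ab ∈ p1.zip p2, (pvTypeOf ab.1).isSome = true ∧ (pvTypeOf ab.2).isSome = true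
instance (p1 : List (List (String × String))) (p2 : List (List (String × String))) : Decidable (Pre_differenceConvPool p1 p2) := by unfold Pre_differenceConvPool; infer_instance

def pvWitness_differenceConvPool : (List (List (String × String))) × (List (List (String × String))) :=
  ([[("type", "conv")]], [[("type", "pool")], [("type", "pool")]])

def Spec_differenceConvPool (p1 : List (List (String × String))) (p2 : List (List (String × String))) (out : List (List (String × String))) : Prop := out = differenceConvPool_alt p1 p2
instance (p1 : List (List (String × String))) (p2 : List (List (String × String))) (out : List (List (String × String))) : Decidable (Spec_differenceConvPool p1 p2 out) := by unfold Spec_differenceConvPool; infer_instance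

-- ===== CLAIM (what is proved, stated in full; the proofs are below) =====
def Claim_equal_differenceConvPool : Prop := ∀ (p1 : List (List (String × String))) (p2 : List (List (String × String))), Dom_differenceConvPool p1 p2 → Pre_differenceConvPool p1 p2 → Spec_differenceConvPool p1 p2 (differenceConvPool p1 p2)

-- ===== LEMMAS AND PROOFS =====
lemma alt_nil_right (as : List (List (String × String))) :
    differenceConvPool_alt as [] = as := by
  cases as <;> simp [differenceConvPool_alt]

lemma foldl_pvZipLongest (p1 p2 : List (List (String × String)))
    (acc : List (List (String × String))) :
    (pvZipLongest p1 p2).foldl (fun diff comb =>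
      match comb with
      | (some a, some b) =>
          if pvTypeOf a = pvTypeOf b then diff ++ [[("type", "keep")]] else diff ++ [a]
      | (some a, none) => diff ++ [a]
      | (none, some _) => diff ++ [[("type", "remove")]]
      | (none, none) => diff) acc = acc ++ differenceConvPool_alt p1 p2 := by
  induction p1 generalizing p2 acc with
  | nil =>
    induction p2 generalizing acc with
    | nil => simp [pvZipLongest, differenceConvPool_alt]
    | cons b bs ih =>
      simp only [pvZipLongest, List.foldl_cons, ih]
      simp [differenceConvPool_alt]
  | cons a as ih =>
    cases p2 with
    | nil =>
      simp only [pvZipLongest, List.foldl_cons, ih]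
      simp [differenceConvPool_alt, alt_nil_right]
    | cons b bs =>
      simp only [pvZipLongest, List.foldl_cons]
      by_cases h : pvTypeOf a = pvTypeOf b <;>
        simp [h, ih, differenceConvPool_alt, List.append_assoc]

-- ===== VERDICT (by name: the statement is the Claim_ definition above) =====
theorem differenceConvPool_spec : Claim_equal_differenceConvPool := by
  intro p1 p2 _ _
  unfold Spec_differenceConvPool differenceConvPool
  simpa using foldl_pvZipLongest p1 p2 []
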